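-- pv_equiv track=rewrite | github.com/cirosantilli/project-euler-solvers | solvers/508.py | brute_diamond
-- ===== SOURCE A (Python) =====
-- MOD = 1_000_000_007
--
-- def f_gauss(a: int, b: int) -> int:
--     """Count 1s in the base (i-1) representation of a+bi.
--
--     Uses the standard division algorithm in Z[i] with base (i-1).
--
--     Least digit r is 1 iff a and b have different parity.
--     Then (a+bi - r) is divisible by (i-1) and we continue with the quotient.
--     """
--     cnt = 0
--     while a != 0 or b != 0:
--         if (a ^ b) & 1:
--             a -= 1
--             cnt += 1
--         # Divide by (i - 1)
--         a, b = (b - a) // 2, -(a + b) // 2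
--     return cnt
--
-- def brute_diamond(u0: int, u1: int, v0: int, v1: int) -> int:
--     s = 0
--     for u in range(u0, u1 + 1):
--         parity = u & 1
--         v_start = v0 if (v0 & 1) == parity else v0 + 1
--         for v in range(v_start, v1 + 1, 2):
--             a = (u + v) // 2
--             b = (u - v) // 2
--             s += f_gauss(a, b)
--     return s % MOD
-- ===== SOURCE B (Python) =====
-- MOD = 1_000_000_007
--
-- def _ones(a, b):
--     """Number of 1-digits of a+bi in base (i-1), two digits per step.
--
--     (i-1)^2 = -2i, so after extracting the two low digits r0, r1 the rest is
--     (a+bi - r0 - r1*(i-1)) / (-2i) = (r1-b)/2 + ((a-r0+r1)/2) i.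
--     """
--     if a == 0 and b == 0:
--         return 0
--     r0 = (a + b) & 1
--     r1 = (a + r0) & 1
--     return r0 + r1 + _ones((r1 - b) // 2, (a - r0 + r1) // 2)
--
-- def brute_diamond(u0, u1, v0, v1):
--     # Traverse the diamond in rotated coordinates a=(u+v)//2, b=(u-v)//2:
--     # the lattice {u0<=u<=u1, v0<=v<=v1, u=v mod 2} is exactly
--     # {(a,b) : u0<=a+b<=u1, v0<=a-b<=v1}, so no parity bookkeeping is needed.
--     if u0 > u1 or v0 > v1:
--         return 0
--     s = 0
--     a_lo = -((-(u0 + v0)) // 2)   # ceil((u0+v0)/2)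
--     a_hi = (u1 + v1) // 2
--     for a in range(a_lo, a_hi + 1):
--         b_lo = max(u0 - a, a - v1)
--         b_hi = min(u1 - a, a - v0)
--         for b in range(b_lo, b_hi + 1):
--             s += _ones(a, b)
--     return s % MOD
-- ===== Notes on version B (the rewrite author's own statement) =====
-- stated objective: alternative
-- what changed: B traverses the diamond in rotated Gaussian coordinates a=(u+v)//2, b=(u-v)//2 (diagonal by diagonal, returning 0 outright for an empty diamond), which removes A's per-row parity adjustment, step-2 inner range and per-point floor divisions, and counts the base-(i-1) one-digits recursively two digits per step via (i-1)^2 = -2i instead of A's one-digit-per-iteration while loop.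
import Mathlib
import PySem

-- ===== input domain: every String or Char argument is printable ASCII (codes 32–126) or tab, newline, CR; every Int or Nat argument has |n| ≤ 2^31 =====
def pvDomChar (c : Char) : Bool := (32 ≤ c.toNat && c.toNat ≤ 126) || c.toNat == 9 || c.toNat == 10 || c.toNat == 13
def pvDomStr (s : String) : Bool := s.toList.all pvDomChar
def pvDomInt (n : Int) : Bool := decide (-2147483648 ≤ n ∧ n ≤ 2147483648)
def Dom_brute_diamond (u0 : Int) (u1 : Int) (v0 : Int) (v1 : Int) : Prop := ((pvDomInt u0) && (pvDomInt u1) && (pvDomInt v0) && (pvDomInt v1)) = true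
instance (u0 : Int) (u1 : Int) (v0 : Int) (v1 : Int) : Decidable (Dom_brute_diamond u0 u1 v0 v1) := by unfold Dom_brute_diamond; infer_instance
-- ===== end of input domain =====

-- B sums the same digit counts over the diamond, but diagonal by diagonal in the
-- rotated Gaussian coordinates a=(u+v)//2, b=(u-v)//2, removing A's parity
-- bookkeeping and step-2 ranges (objective: alternative, not claimed faster).

-- ===== PORT A =====
-- Python's while loop, made total with a fuel counter (a totality guard only:
-- the state norm halves every iteration, so 200 iterations are ample for all
-- Dom-bounded inputs; the fuel branch is never reached there).
def fgaussLoop : Nat → Int → Int → Int → Int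
  | 0, _, _, cnt => cnt
  | Nat.succ fuel, a, b, cnt =>
    if a ≠ 0 ∨ b ≠ 0 then
      -- if (a ^ b) & 1: a -= 1; cnt += 1   (truthiness: the value is nonzero)
      let p := if PySem.Int.band (PySem.Int.bxor a b) 1 ≠ 0 then (a - 1, cnt + 1) else (a, cnt)
      -- a, b = (b - a) // 2, -(a + b) // 2
      fgaussLoop fuel (PySem.Int.floordiv (b - p.1) 2) (PySem.Int.floordiv (-(p.1 + b)) 2) p.2
    else cnt

def f_gauss (a : Int) (b : Int) : Int := fgaussLoop 200 a b 0

def brute_diamond (u0 : Int) (u1 : Int) (v0 : Int) (v1 : Int) : Int :=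
  let s := (PySem.List.pyRange u0 (u1 + 1) 1).foldl (fun s u =>
    let parity := PySem.Int.band u 1
    let v_start := if PySem.Int.band v0 1 = parity then v0 else v0 + 1
    (PySem.List.pyRange v_start (v1 + 1) 2).foldl (fun s v =>
      s + f_gauss (PySem.Int.floordiv (u + v) 2) (PySem.Int.floordiv (u - v) 2)) s) 0
  PySem.Int.mod s 1000000007

-- ===== PORT B =====
-- recursive two-digits-per-step counter of Source B, made total with ample fuel
-- (each step strips two base-(i-1) digits, so 100 steps cover Dom-bounded inputs)
def onesRec : Nat → Int → Int → Int
  | 0, _, _ => 0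
  | Nat.succ fuel, a, b =>
    if a = 0 ∧ b = 0 then 0
    else
      let r0 := PySem.Int.band (a + b) 1
      let r1 := PySem.Int.band (a + r0) 1
      r0 + r1 + onesRec fuel (PySem.Int.floordiv (r1 - b) 2) (PySem.Int.floordiv (a - r0 + r1) 2)

def brute_diamond_alt (u0 : Int) (u1 : Int) (v0 : Int) (v1 : Int) : Int :=
  if u0 > u1 ∨ v0 > v1 then 0 else
  let aLo := -(PySem.Int.floordiv (-(u0 + v0)) 2)
  let aHi := PySem.Int.floordiv (u1 + v1) 2
  let s := (PySem.List.pyRange aLo (aHi + 1) 1).foldl (fun s a =>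
    let bLo := max (u0 - a) (a - v1)
    let bHi := min (u1 - a) (a - v0)
    (PySem.List.pyRange bLo (bHi + 1) 1).foldl (fun s b => s + onesRec 100 a b) s) 0
  PySem.Int.mod s 1000000007

-- ===== PRECONDITION & SPEC =====
def Spec_brute_diamond (u0 : Int) (u1 : Int) (v0 : Int) (v1 : Int) (out : Int) : Prop := out = brute_diamond_alt u0 u1 v0 v1
instance (u0 : Int) (u1 : Int) (v0 : Int) (v1 : Int) (out : Int) : Decidable (Spec_brute_diamond u0 u1 v0 v1 out) := by unfold Spec_brute_diamond; infer_instance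

-- ===== CLAIM (what is proved, stated in full; the proofs are below) =====
def Claim_equal_brute_diamond : Prop := ∀ (u0 : Int) (u1 : Int) (v0 : Int) (v1 : Int), Dom_brute_diamond u0 u1 v0 v1 → Spec_brute_diamond u0 u1 v0 v1 (brute_diamond u0 u1 v0 v1)

-- ===== LEMMAS AND PROOFS =====

-- xor and sum have the same parity
theorem pv_parity_bxor (a b : Int) :
    PySem.Int.mod (PySem.Int.bxor a b) 2 = PySem.Int.mod (a + b) 2 := by
  rw [PySem.Int.mod_eq_emod_of_pos (by norm_num), PySem.Int.mod_eq_emod_of_pos (by norm_num)]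
  unfold PySem.Int.bxor
  split_ifs with h1 h2 h2 <;>
  · first
    | (have h := @Nat.xor_mod_two_eq a.toNat b.toNat; omega)
    | (have h := @Nat.xor_mod_two_eq a.toNat (-b - 1).toNat; omega)
    | (have h := @Nat.xor_mod_two_eq (-a - 1).toNat b.toNat; omega)
    | (have h := @Nat.xor_mod_two_eq (-a - 1).toNat (-b - 1).toNat; omega)

theorem pv_parity_bxor' (a b : Int) : PySem.Int.bxor a b % 2 = (a + b) % 2 := by
  have h := pv_parity_bxor a b
  rw [PySem.Int.mod_eq_emod_of_pos (show (0:Int) < 2 by norm_num),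
    PySem.Int.mod_eq_emod_of_pos (show (0:Int) < 2 by norm_num)] at h
  exact h

-- the loop ignores a (0,0) state
theorem pv_loop_zero (m : Nat) (c : Int) : fgaussLoop m 0 0 c = c := by
  cases m <;> simp [fgaussLoop]

theorem pv_ones_zero (m : Nat) : onesRec m 0 0 = 0 := by
  cases m <;> simp [onesRec]

-- one iteration of A's while loop, with the branch resolved into arithmetic
theorem pv_A_step (m : Nat) (a b c : Int) (h : ¬(a = 0 ∧ b = 0)) :
    fgaussLoop (m + 1) a b c =
      fgaussLoop m ((b - (a - (a + b) % 2)) / 2) ((-((a - (a + b) % 2) + b)) / 2)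
        (c + (a + b) % 2) := by
  rw [fgaussLoop, if_pos (by tauto)]
  simp only [PySem.Int.band_one,
    PySem.Int.mod_eq_emod_of_pos (show (0:Int) < 2 by norm_num),
    PySem.Int.floordiv_eq_ediv_of_pos (show (0:Int) < 2 by norm_num), pv_parity_bxor']
  rcases Int.emod_two_eq_zero_or_one (a + b) with hm | hm <;>
    simp only [hm] <;> norm_num

-- two iterations of A's while loop equal one two-digit step of B's counter
theorem pv_fgaussLoop_eq_onesRec (n : Nat) : ∀ (a b c : Int),
    fgaussLoop (2 * n) a b c = c + onesRec n a b := by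
  induction n with
  | zero => intro a b c; norm_num [fgaussLoop, onesRec]
  | succ n ih =>
    intro a b c
    rw [onesRec]
    by_cases h : a = 0 ∧ b = 0
    · obtain ⟨rfl, rfl⟩ := h
      rw [if_pos ⟨rfl, rfl⟩, pv_loop_zero]
      ring
    · rw [if_neg h, show 2 * (n + 1) = (2 * n + 1) + 1 by ring, pv_A_step (2 * n + 1) a b c h]
      simp only [PySem.Int.band_one,
        PySem.Int.mod_eq_emod_of_pos (show (0:Int) < 2 by norm_num),
        PySem.Int.floordiv_eq_ediv_of_pos (show (0:Int) < 2 by norm_num)]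
      by_cases h1 : (b - (a - (a + b) % 2)) / 2 = 0 ∧ (-((a - (a + b) % 2) + b)) / 2 = 0
      · obtain ⟨e1, e2⟩ := h1
        rw [e1, e2, pv_loop_zero]
        have hr1 : (a + (a + b) % 2) % 2 = 0 := by omega
        rw [hr1]
        have hX : ((0:Int) - b) / 2 = 0 := by omega
        have hY : (a - (a + b) % 2 + 0) / 2 = 0 := by omega
        rw [hX, hY, pv_ones_zero]
        omega
      · rw [pv_A_step (2 * n) _ _ _ h1, ih]
        have er1 : ((b - (a - (a + b) % 2)) / 2 + (-((a - (a + b) % 2) + b)) / 2) % 2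
            = (a + (a + b) % 2) % 2 := by omega
        rw [er1]
        have eX : ((-((a - (a + b) % 2) + b)) / 2 -
              ((b - (a - (a + b) % 2)) / 2 - (a + (a + b) % 2) % 2)) / 2
            = ((a + (a + b) % 2) % 2 - b) / 2 := by omega
        have eY : (-(((b - (a - (a + b) % 2)) / 2 - (a + (a + b) % 2) % 2 +
              (-((a - (a + b) % 2) + b)) / 2))) / 2
            = (a - (a + b) % 2 + (a + (a + b) % 2) % 2) / 2 := by omega
        rw [eX, eY]
        omega

theorem pv_sum_map_range (n : Nat) (f : Nat → Int) :
    ((List.range n).map f).sum = ∑ k ∈ Finset.range n, f k := by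
  induction n with
  | zero => simp
  | succ n ih => simp [List.range_succ, Finset.sum_range_succ, ih]

theorem pv_sum_pyRange_one (g : Int → Int) (a b : Int) :
    ((PySem.List.pyRange a b 1).map g).sum = ∑ x ∈ Finset.Icc a (b - 1), g x := by
  rw [PySem.List.pyRange_one, List.map_map, pv_sum_map_range]
  refine Finset.sum_nbij' (i := fun k => a + (k : Int)) (j := fun x => (x - a).toNat)
    ?_ ?_ ?_ ?_ ?_ <;> intro x hx <;>
    simp only [Finset.mem_range, Finset.mem_Icc, Function.comp] at * <;> omega

theorem pv_sum_pyRange_two (g : Int → Int) (a b : Int) :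
    ((PySem.List.pyRange a b 2).map g).sum =
      ∑ x ∈ (Finset.Icc a (b - 1)).filter (fun x => (x - a) % 2 = 0), g x := by
  rw [PySem.List.pyRange_of_pos a b (by norm_num), List.map_map, pv_sum_map_range]
  by_cases hab : a < b
  · refine Finset.sum_nbij' (i := fun k => a + 2 * (k : Int)) (j := fun x => ((x - a) / 2).toNat)
      ?_ ?_ ?_ ?_ ?_ <;> intro x hx <;>
      simp only [Finset.mem_range, Finset.mem_filter, Finset.mem_Icc, Function.comp,
        if_pos hab] at * <;> omega
  · have : Finset.Icc a (b - 1) = ∅ := Finset.Icc_eq_empty (by omega)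
    simp [hab, this]

-- a double sum with an inner filter is a sum over the filtered product
theorem pv_sum_sum_filter (s t : Finset Int) (c : Int → Int → Prop)
    [DecidablePred fun p : Int × Int => c p.1 p.2] [∀ x, DecidablePred (c x)]
    (F : Int → Int → Int) :
    (∑ x ∈ s, ∑ y ∈ t.filter (c x), F x y) =
      ∑ p ∈ (s ×ˢ t).filter (fun p => c p.1 p.2), F p.1 p.2 := by
  rw [Finset.sum_filter, Finset.sum_product]
  refine Finset.sum_congr rfl fun x _ => ?_
  rw [Finset.sum_filter]

-- characterization of A as a sum over the parity-filtered diamond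
theorem pv_A_char (u0 u1 v0 v1 : Int) :
    brute_diamond u0 u1 v0 v1 =
      PySem.Int.mod
        (∑ p ∈ (Finset.Icc u0 u1 ×ˢ Finset.Icc v0 v1).filter
            (fun p : Int × Int => (p.2 - p.1) % 2 = 0),
          onesRec 100 ((p.1 + p.2) / 2) ((p.1 - p.2) / 2)) 1000000007 := by
  simp only [brute_diamond]
  rw [PySem.List.foldl_congr_mem _ _
      (fun s u => s + ((PySem.List.pyRange
          (if PySem.Int.band v0 1 = PySem.Int.band u 1 then v0 else v0 + 1)
          (v1 + 1) 2).map (fun v =>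
            f_gauss (PySem.Int.floordiv (u + v) 2) (PySem.Int.floordiv (u - v) 2))).sum) 0
      (fun acc u _ => by rw [PySem.List.foldl_add])]
  rw [PySem.List.foldl_add, pv_sum_pyRange_one, zero_add, add_sub_cancel_right]
  congr 1
  have step : ∀ u : Int,
      ((PySem.List.pyRange
          (if PySem.Int.band v0 1 = PySem.Int.band u 1 then v0 else v0 + 1)
          (v1 + 1) 2).map (fun v =>
            f_gauss (PySem.Int.floordiv (u + v) 2) (PySem.Int.floordiv (u - v) 2))).sum
        = ∑ v ∈ (Finset.Icc v0 v1).filter (fun v => (v - u) % 2 = 0),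
            onesRec 100 ((u + v) / 2) ((u - v) / 2) := by
    intro u
    rw [pv_sum_pyRange_two]
    have hset : (Finset.Icc (if PySem.Int.band v0 1 = PySem.Int.band u 1 then v0 else v0 + 1)
          (v1 + 1 - 1)).filter
          (fun x => (x - (if PySem.Int.band v0 1 = PySem.Int.band u 1 then v0 else v0 + 1)) % 2 = 0)
        = (Finset.Icc v0 v1).filter (fun v => (v - u) % 2 = 0) := by
      ext x
      rw [PySem.Int.band_one, PySem.Int.band_one,
        PySem.Int.mod_eq_emod_of_pos (b := 2) (by norm_num),
        PySem.Int.mod_eq_emod_of_pos (b := 2) (by norm_num)]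
      simp only [Finset.mem_filter, Finset.mem_Icc]
      split_ifs with hpar <;> omega
    rw [hset]
    refine Finset.sum_congr rfl fun v _ => ?_
    simp only [f_gauss]
    rw [show (200:Nat) = 2 * 100 from rfl, pv_fgaussLoop_eq_onesRec, zero_add,
      PySem.Int.floordiv_eq_ediv_of_pos (by norm_num),
      PySem.Int.floordiv_eq_ediv_of_pos (by norm_num)]
  rw [Finset.sum_congr rfl fun u _ => step u]
  rw [pv_sum_sum_filter (Finset.Icc u0 u1) (Finset.Icc v0 v1)
      (fun u v => (v - u) % 2 = 0)
      (fun u v => onesRec 100 ((u + v) / 2) ((u - v) / 2))]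

-- characterization of B as a sum over the rotated (inequality-filtered) region
theorem pv_B_char (u0 u1 v0 v1 : Int) :
    brute_diamond_alt u0 u1 v0 v1 =
      PySem.Int.mod
        (∑ q ∈ (Finset.Icc (-((-(u0 + v0)) / 2)) ((u1 + v1) / 2) ×ˢ
            Finset.Icc (min (u0 - (u1 + v1) / 2) (-((-(u0 + v0)) / 2) - v1))
              (max (u1 - -((-(u0 + v0)) / 2)) ((u1 + v1) / 2 - v0))).filter
            (fun q : Int × Int =>
              u0 ≤ q.1 + q.2 ∧ q.1 + q.2 ≤ u1 ∧ v0 ≤ q.1 - q.2 ∧ q.1 - q.2 ≤ v1),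
          onesRec 100 q.1 q.2) 1000000007 := by
  by_cases hemp : u0 > u1 ∨ v0 > v1
  · rw [brute_diamond_alt, if_pos hemp,
      Finset.filter_false_of_mem (fun q hq => by omega), Finset.sum_empty]
    decide
  simp only [brute_diamond_alt, if_neg hemp,
    PySem.Int.floordiv_eq_ediv_of_pos (show (0:Int) < 2 by norm_num)]
  rw [PySem.List.foldl_congr_mem _ _
      (fun s a => s + ((PySem.List.pyRange (max (u0 - a) (a - v1))
          (min (u1 - a) (a - v0) + 1) 1).map (fun b => onesRec 100 a b)).sum) 0
      (fun acc a _ => by rw [PySem.List.foldl_add])]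
  rw [PySem.List.foldl_add, pv_sum_pyRange_one, zero_add, add_sub_cancel_right]
  congr 1
  refine Eq.trans (b := ∑ a ∈ Finset.Icc (-((-(u0 + v0)) / 2)) ((u1 + v1) / 2),
      ∑ b ∈ (Finset.Icc (min (u0 - (u1 + v1) / 2) (-((-(u0 + v0)) / 2) - v1))
          (max (u1 - -((-(u0 + v0)) / 2)) ((u1 + v1) / 2 - v0))).filter
          (fun b => u0 ≤ a + b ∧ a + b ≤ u1 ∧ v0 ≤ a - b ∧ a - b ≤ v1),
        onesRec 100 a b) (Finset.sum_congr rfl fun a ha => ?_) ?_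
  · rw [pv_sum_pyRange_one, add_sub_cancel_right]
    refine Finset.sum_congr ?_ fun b _ => rfl
    simp only [Finset.mem_Icc] at ha
    ext b
    simp only [Finset.mem_filter, Finset.mem_Icc, le_min_iff, max_le_iff, min_le_iff, le_max_iff]
    omega
  rw [pv_sum_sum_filter (Finset.Icc (-((-(u0 + v0)) / 2)) ((u1 + v1) / 2))
      (Finset.Icc (min (u0 - (u1 + v1) / 2) (-((-(u0 + v0)) / 2) - v1))
        (max (u1 - -((-(u0 + v0)) / 2)) ((u1 + v1) / 2 - v0)))
      (fun a b => u0 ≤ a + b ∧ a + b ≤ u1 ∧ v0 ≤ a - b ∧ a - b ≤ v1)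
      (fun a b => onesRec 100 a b)]

-- ===== VERDICT (by name: the statement is the Claim_ definition above) =====
theorem brute_diamond_spec : Claim_equal_brute_diamond := by
  intro u0 u1 v0 v1 _
  show brute_diamond u0 u1 v0 v1 = brute_diamond_alt u0 u1 v0 v1
  rw [pv_A_char, pv_B_char]
  congr 1
  refine Finset.sum_nbij'
    (i := fun p : Int × Int => ((p.1 + p.2) / 2, (p.1 - p.2) / 2))
    (j := fun q : Int × Int => (q.1 + q.2, q.1 - q.2)) ?_ ?_ ?_ ?_ ?_ <;>
    rintro ⟨x, y⟩ hx <;>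
    simp only [Finset.mem_filter, Finset.mem_product, Finset.mem_Icc,
      min_le_iff, le_max_iff, Prod.mk.injEq] at * <;>
    omega
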